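-- pv_equiv track=rewrite | github.com/dbsolution-computacion-e-informatica/consorcio-service-technical-challenge | src/utils/checker.py | is_mutant
-- ===== SOURCE A (Python) =====
-- def is_mutant(rows):
--     """This function allows you tue determine if a DNA array belongs to a mutant or a human.
--
--     Args:
--         rows (string[]): The DNA rows of strings.
--
--     Returns:
--         bool: The return value. True when DNA belongs to a mutant, false when not.
--     """
--
--     for x in range(len(rows)):
--         for y in range(len(rows[x])):
--
--             # to the right / horizontal
--             if count_by_direction(rows, rows[x][y], x, y, +1, 0, 0) > 3:
--                 return True
--
--             # to the bottom / vertical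
--             if count_by_direction(rows, rows[x][y], x, y, 0, +1, 0) > 3:
--                 return True
--
--             # to the bottom right / diagonal
--             if count_by_direction(rows, rows[x][y], x, y, +1, +1, 0) > 3:
--                 return True
--
--             # to the bottom left / diagonal
--             if count_by_direction(rows, rows[x][y], x, y, -1, +1, 0) > 3:
--                 return True
--
--     return False
--
-- def count_by_direction(rows, letter, current_x, current_y, direction_x, direction_y, count):
--     """This function allow us to to recursively move into the 2 dimensional matrix
--     and search for continuous chars
--
--     Args:
--         rows (string[]): The DNA rows of strings.
--         letter (char): The current analyzed char
--         current_x (int): The current X position in the 2 dimensions matrix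
--         current_y (int): The current Y position in the 2 dimensions matrix
--         direction_x (int): The desired movement on X axis
--         direction_y (int): The desired movement on Y axis
--         count (int): The current count observed during the recursive process
--
--     Returns:
--         bool: The return value. The new observed count after procesing
--     """
--
--     x = current_x + direction_x
--     y = current_y + direction_y
--
--     try:
--         if letter == rows[x][y]:
--
--             count += 1
--
--             # If we didn't reach minimum of 4, we will still search, avoid loosing time
--             if count < 4:
--                 count += count_by_direction(rows, letter, x, y, direction_x, direction_y, count)
--
--             return count
--         else:
--             return 0
--     except IndexError:
--         return 0
-- ===== SOURCE B (Python) =====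
-- def is_mutant(rows):
--     """Iterative re-implementation: walk outward in each of the four directions,
--     counting the run length with raw Python indexing (so negative indices wrap
--     exactly as in the original)."""
--     for x in range(len(rows)):
--         row = rows[x]
--         for y in range(len(row)):
--             letter = row[y]
--             for dx, dy in ((1, 0), (0, 1), (1, 1), (-1, 1)):
--                 cnt = 1
--                 nx, ny = x, y
--                 while cnt < 4:
--                     nx += dx
--                     ny += dy
--                     try:
--                         if rows[nx][ny] != letter:
--                             break
--                     except IndexError:
--                         break
--                     cnt += 1
--                 if cnt == 4:
--                     return True
--     return False
-- ===== Notes on version B (the rewrite author's own statement) =====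
-- stated objective: alternative
-- what changed: Replaces the recursive count_by_direction helper (with its nested count accumulation and >3 threshold) by an iterative outward walk per direction that counts the run length and returns True as soon as it reaches 4, keeping Python's raw indexing so negative-index wraparound and IndexError stops match exactly.
import Mathlib
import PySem

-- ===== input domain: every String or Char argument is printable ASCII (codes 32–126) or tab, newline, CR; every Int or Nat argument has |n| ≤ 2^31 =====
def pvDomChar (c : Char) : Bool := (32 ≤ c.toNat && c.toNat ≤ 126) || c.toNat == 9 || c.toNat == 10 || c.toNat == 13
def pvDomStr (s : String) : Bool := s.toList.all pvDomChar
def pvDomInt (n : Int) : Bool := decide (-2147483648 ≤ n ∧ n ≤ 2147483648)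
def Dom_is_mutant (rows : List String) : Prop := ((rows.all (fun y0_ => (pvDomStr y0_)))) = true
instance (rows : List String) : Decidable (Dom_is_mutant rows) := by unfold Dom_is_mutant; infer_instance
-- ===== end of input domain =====

-- B replaces A's recursive count_by_direction by an iterative outward walk per direction
-- that counts the run length and stops at 4 (objective: alternative decomposition, same cost).

-- shared plumbing: rows[x][y] with Python indexing; none = IndexError (negative wraps)
def pvCell (rows : List String) (x y : Int) : Option Char :=
  match PySem.List.pyGet? rows x with
  | none => none
  | some row => PySem.Str.pyGet? row y

-- ===== PORT A =====
def count_by_direction (rows : List String) (letter : Char)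
    (current_x current_y direction_x direction_y count : Int) : Int :=
  -- x = current_x + direction_x; y = current_y + direction_y; try rows[x][y] … except IndexError: return 0
  match pvCell rows (current_x + direction_x) (current_y + direction_y) with
  | none => 0
  | some ch =>
    if letter = ch then
      -- count += 1; if count < 4: count += recurse; return count
      if _h : count + 1 < 4 then
        (count + 1) + count_by_direction rows letter (current_x + direction_x)
          (current_y + direction_y) direction_x direction_y (count + 1)
      else count + 1
    else 0
termination_by (4 - count).toNat
decreasing_by omega

def is_mutant (rows : List String) : Bool :=
  (PySem.List.pyRange 0 rows.length 1).any (fun x =>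
    match PySem.List.pyGet? rows x with
    | none => false
    | some row =>
      (PySem.List.pyRange 0 (PySem.Str.len row) 1).any (fun y =>
        match PySem.Str.pyGet? row y with
        | none => false
        | some letter =>
          decide (count_by_direction rows letter x y 1 0 0 > 3) ||
          decide (count_by_direction rows letter x y 0 1 0 > 3) ||
          decide (count_by_direction rows letter x y 1 1 0 > 3) ||
          decide (count_by_direction rows letter x y (-1) 1 0 > 3)))

-- ===== PORT B =====
-- the while loop: step outward while cnt < 4 and the next cell equals letter; returns final cnt
def pvWalk (rows : List String) (letter : Char) (nx ny dx dy cnt : Int) : Int :=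
  if _h : cnt < 4 then
    match pvCell rows (nx + dx) (ny + dy) with
    | none => cnt
    | some ch =>
      if ch ≠ letter then cnt
      else pvWalk rows letter (nx + dx) (ny + dy) dx dy (cnt + 1)
  else cnt
termination_by (4 - cnt).toNat
decreasing_by omega

def is_mutant_alt (rows : List String) : Bool :=
  (PySem.List.pyRange 0 rows.length 1).any (fun x =>
    match PySem.List.pyGet? rows x with
    | none => false
    | some row =>
      (PySem.List.pyRange 0 (PySem.Str.len row) 1).any (fun y =>
        match PySem.Str.pyGet? row y with
        | none => false
        | some letter =>
          [((1:Int), (0:Int)), (0, 1), (1, 1), (-1, 1)].any (fun d =>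
            pvWalk rows letter x y d.1 d.2 1 == 4)))

-- ===== PRECONDITION & SPEC =====
def Spec_is_mutant (rows : List String) (out : Bool) : Prop := out = is_mutant_alt rows
instance (rows : List String) (out : Bool) : Decidable (Spec_is_mutant rows out) := by unfold Spec_is_mutant; infer_instance

-- ===== CLAIM (what is proved, stated in full; the proofs are below) =====
def Claim_equal_is_mutant : Prop := ∀ (rows : List String), Dom_is_mutant rows → Spec_is_mutant rows (is_mutant rows)

-- ===== LEMMAS AND PROOFS =====

-- one direction at one cell: A's count reaching >3 is exactly B's walk reaching 4
lemma pv_key (rows : List String) (l : Char) (x y dx dy : Int) :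
    decide (count_by_direction rows l x y dx dy 0 > 3) =
      (pvWalk rows l x y dx dy 1 == 4) := by
  rcases h1 : pvCell rows (x + dx) (y + dy) with _ | c1
  · simp [count_by_direction, pvWalk, h1]
  · by_cases e1 : l = c1
    · subst e1
      rcases h2 : pvCell rows (x + dx + dx) (y + dy + dy) with _ | c2
      · simp [count_by_direction, pvWalk, h1, h2]
      · by_cases e2 : l = c2
        · subst e2
          rcases h3 : pvCell rows (x + dx + dx + dx) (y + dy + dy + dy) with _ | c3
          · simp [count_by_direction, pvWalk, h1, h2, h3]
          · by_cases e3 : l = c3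
            · subst e3
              simp [count_by_direction, pvWalk, h1, h2, h3]
              rcases pvCell rows (x + dx + dx + dx + dx) (y + dy + dy + dy + dy) with _ | c4
              · norm_num
              · simp only []
                split_ifs <;> norm_num
            · simp [count_by_direction, pvWalk, h1, h2, h3, e3, Ne.symm e3]
        · simp [count_by_direction, pvWalk, h1, h2, e2, Ne.symm e2]
    · simp [count_by_direction, pvWalk, h1, e1, Ne.symm e1]

-- ===== VERDICT (by name: the statement is the Claim_ definition above) =====
theorem is_mutant_spec : Claim_equal_is_mutant := by
  intro rows _
  unfold Spec_is_mutant is_mutant is_mutant_alt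
  refine PySem.List.any_congr_mem (fun x hx => ?_)
  rcases PySem.List.pyGet? rows x with _ | row
  · rfl
  · refine PySem.List.any_congr_mem (fun y hy => ?_)
    rcases PySem.Str.pyGet? row y with _ | letter
    · rfl
    · simp only [List.any_cons, List.any_nil, pv_key, Bool.or_false, Bool.or_assoc]
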